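-- pv_equiv track=rewrite | github.com/Price3258/pythonrithm | 3rd_week/homework_get_melon_best_album.py | get_melon_best_album_v2
-- ===== SOURCE A (Python) =====
-- def get_melon_best_album_v2(genre_array, play_array):
--     # 1. dict 에 장르별로 얼마나 재생횟수를 가지고 있는가
--     # 2. dict 에 장르별로 어느 인덱스에 몇번 재생횟수를 가지고 있는가
--
--     n = len(genre_array)
--     genre_total_play_dict = {}
--     genre_index_play_array_dict = {}
--
--     for i in range(n):
--         genre = genre_array[i] # classic
--         play = play_array[i] # 500
--
--         if genre in genre_total_play_dict: #classic 이라는 키값이 있었으면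
--             genre_total_play_dict[genre] += play #재생횟수를 더해줘야 할테니까요
--             genre_index_play_array_dict[genre].append([i, play])
--         else: #키 값이 없는 상황이라면
--             genre_total_play_dict[genre] = play # 500
--             genre_index_play_array_dict[genre] = [[i, play]]
--
--     # 장르별로 가장 재생횟수가 많은 장르들 중, 곡수가 많은 순서대로 2개씩 출력하기.
--     sorted_genre_play_array = sorted(genre_total_play_dict.items(), key=lambda item: item[1], reverse=True)
--
--     result = []
--     for genre, total_play in sorted_genre_play_array:
--         sorted_genre_index_play_array = sorted(genre_index_play_array_dict[genre], key=lambda item: item[1], reverse=True)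
--
--         genre_song_count = 0
--         for index, play in sorted_genre_index_play_array:
--             if genre_song_count >= 2:
--                 break
--
--             result.append(index)
--             genre_song_count += 1
--
--     return result
-- ===== SOURCE B (Python) =====
-- def get_melon_best_album_v2(genre_array, play_array):
--     n = len(genre_array)
--     total = {}
--     first = {}
--     for i in range(n):
--         g = genre_array[i]
--         p = play_array[i]
--         if g in total:
--             total[g] += p
--         else:
--             total[g] = p
--             first[g] = len(first)
--     order = sorted(range(n), key=lambda i: (-total[genre_array[i]],
--                                             first[genre_array[i]],
--                                             -play_array[i],
--                                             i))
--     result = []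
--     emitted = {}
--     for i in order:
--         g = genre_array[i]
--         c = emitted.get(g, 0)
--         if c < 2:
--             result.append(i)
--             emitted[g] = c + 1
--     return result
-- ===== Notes on version B (the rewrite author's own statement) =====
-- stated objective: alternative
-- what changed: Replaces A's two-level scheme (per-genre dicts, sort genres by total, then sort each genre's [index,play] list and take two) by one global sort of all song indices under the composite key (-genre_total, genre_first_seen, -play, index) followed by a single linear pass that emits at most two indices per genre.
import Mathlib
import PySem

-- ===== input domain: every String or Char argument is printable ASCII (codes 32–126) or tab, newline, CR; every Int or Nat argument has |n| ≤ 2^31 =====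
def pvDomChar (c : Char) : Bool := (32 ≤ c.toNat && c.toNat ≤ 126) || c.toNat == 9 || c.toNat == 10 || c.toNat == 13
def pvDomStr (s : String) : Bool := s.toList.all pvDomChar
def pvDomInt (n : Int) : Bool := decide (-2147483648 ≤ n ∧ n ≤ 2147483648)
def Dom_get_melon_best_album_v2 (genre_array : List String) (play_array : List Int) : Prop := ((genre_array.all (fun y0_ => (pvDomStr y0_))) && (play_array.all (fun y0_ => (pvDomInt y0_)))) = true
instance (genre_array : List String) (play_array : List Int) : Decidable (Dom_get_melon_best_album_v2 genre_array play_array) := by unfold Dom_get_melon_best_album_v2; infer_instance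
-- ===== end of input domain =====

-- B replaces A's nested per-genre sorts by one global sort of all indices under the
-- composite key (-genre_total, first_seen, -play, index) plus a single emit pass (alternative decomposition, same cost).
-- ===== PORT A =====
def get_melon_best_album_v2 (genre_array : List String) (play_array : List Int) : List Int :=
  let n : Int := (genre_array.length : Int)
  let st :=
    (PySem.List.pyRange 0 n 1).foldl (fun st i =>
      let genre := PySem.List.pyGetD genre_array i ""
      let play := PySem.List.pyGetD play_array i 0
      if st.1.contains genre then
        (st.1.modify genre 0 (· + play), st.2.modify genre [] (· ++ [(i, play)]))
      else
        (st.1.insert genre play, st.2.insert genre [(i, play)]))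
      ((PySem.Dict.empty : PySem.Dict String Int),
       (PySem.Dict.empty : PySem.Dict String (List (Int × Int))))
  let sorted_genre_play_array := PySem.List.sorted st.1.items (fun item => item.2) true
  sorted_genre_play_array.foldl (fun result gp =>
    let sorted_genre_index_play_array := PySem.List.sorted (st.2.getD gp.1 []) (fun item => item.2) true
    (sorted_genre_index_play_array.foldl (fun rc ip =>
        if rc.2 ≥ 2 then rc else (rc.1 ++ [ip.1], rc.2 + 1)) (result, (0 : Int))).1) []

-- ===== PORT B =====
def get_melon_best_album_v2_alt (genre_array : List String) (play_array : List Int) : List Int :=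
  let n : Int := (genre_array.length : Int)
  let tf :=
    (PySem.List.pyRange 0 n 1).foldl (fun tf i =>
      let g := PySem.List.pyGetD genre_array i ""
      let p := PySem.List.pyGetD play_array i 0
      if tf.1.contains g then (tf.1.modify g 0 (· + p), tf.2)
      else (tf.1.insert g p, tf.2.insert g (tf.2.items.length : Int)))
      ((PySem.Dict.empty : PySem.Dict String Int), (PySem.Dict.empty : PySem.Dict String Int))
  -- the Python tuple key (-total[g], first[g], -play, i), lexicographic as in Python
  let key : Int → Lex (Int × Lex (Int × Lex (Int × Int))) := fun i =>
    let g := PySem.List.pyGetD genre_array i ""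
    toLex (-(tf.1.getD g 0), toLex (tf.2.getD g 0, toLex (-(PySem.List.pyGetD play_array i 0), i)))
  let order := PySem.List.sorted (PySem.List.pyRange 0 n 1) key false
  (order.foldl (fun st i =>
      let g := PySem.List.pyGetD genre_array i ""
      let c := st.2.getD g 0
      if c < 2 then (st.1 ++ [i], st.2.insert g (c + 1)) else st)
    (([] : List Int), (PySem.Dict.empty : PySem.Dict String Int))).1

-- ===== PRECONDITION & SPEC =====
-- A raises IndexError on play_array[i] when play_array is shorter than genre_array; exactly those inputs are excluded.
def Pre_get_melon_best_album_v2 (genre_array : List String) (play_array : List Int) : Prop :=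
  genre_array.length ≤ play_array.length
instance (genre_array : List String) (play_array : List Int) : Decidable (Pre_get_melon_best_album_v2 genre_array play_array) := by unfold Pre_get_melon_best_album_v2; infer_instance

def pvWitness_get_melon_best_album_v2 : List String × List Int :=
  (["classic", "pop", "classic", "classic", "pop"], [500, 600, 150, 800, 2500])

def Spec_get_melon_best_album_v2 (genre_array : List String) (play_array : List Int) (out : List Int) : Prop := out = get_melon_best_album_v2_alt genre_array play_array
instance (genre_array : List String) (play_array : List Int) (out : List Int) : Decidable (Spec_get_melon_best_album_v2 genre_array play_array out) := by unfold Spec_get_melon_best_album_v2; infer_instance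

-- ===== CLAIM (what is proved, stated in full; the proofs are below) =====
def Claim_equal_get_melon_best_album_v2 : Prop := ∀ (genre_array : List String) (play_array : List Int), Dom_get_melon_best_album_v2 genre_array play_array → Pre_get_melon_best_album_v2 genre_array play_array → Spec_get_melon_best_album_v2 genre_array play_array (get_melon_best_album_v2 genre_array play_array)

-- ===== LEMMAS AND PROOFS =====


-- canonical descriptions of the loop states
def pvG (G : List String) (j : Nat) : String := G.getD j ""
def pvP (P : List Int) (j : Nat) : Int := P.getD j 0
def pvGenres (G : List String) (m : Nat) : List String :=
  PySem.Set.ofList ((List.range m).map (pvG G))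
def pvGrp (G : List String) (P : List Int) (m : Nat) (g : String) : List (Int × Int) :=
  ((List.range m).filter (fun j => pvG G j == g)).map (fun (j : Nat) => ((j : Int), pvP P j))
def pvTot (G : List String) (P : List Int) (m : Nat) (g : String) : Int :=
  ((pvGrp G P m g).map (·.2)).sum

def pvAfold (G : List String) (P : List Int) (m : Nat) :
    PySem.Dict String Int × PySem.Dict String (List (Int × Int)) :=
  (List.range m).foldl (fun st j =>
      let genre := pvG G j
      let play := pvP P j
      if st.1.contains genre then
        (st.1.modify genre 0 (· + play), st.2.modify genre [] (· ++ [((j : Int), play)]))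
      else
        (st.1.insert genre play, st.2.insert genre [((j : Int), play)]))
    (PySem.Dict.empty, PySem.Dict.empty)

def pvBfold (G : List String) (P : List Int) (m : Nat) :
    PySem.Dict String Int × PySem.Dict String Int :=
  (List.range m).foldl (fun tf j =>
      let g := pvG G j
      let p := pvP P j
      if tf.1.contains g then (tf.1.modify g 0 (· + p), tf.2)
      else (tf.1.insert g p, tf.2.insert g (tf.2.items.length : Int)))
    (PySem.Dict.empty, PySem.Dict.empty)

lemma pvGenres_succ (G : List String) (m : Nat) :
    pvGenres G (m + 1) =
      if pvG G m ∈ pvGenres G m then pvGenres G m else pvGenres G m ++ [pvG G m] := by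
  simp [pvGenres, List.range_succ, PySem.Set.ofList_append_singleton, PySem.Set.add_eq_ite]

lemma pvGenres_nodup (G : List String) (m : Nat) : (pvGenres G m).Nodup :=
  PySem.Set.nodup_ofList _

lemma mem_pvGenres (G : List String) (m : Nat) (g : String) :
    g ∈ pvGenres G m ↔ ∃ j < m, pvG G j = g := by
  simp [pvGenres, PySem.Set.mem_ofList, List.mem_map, List.mem_range]

lemma pvGrp_succ (G : List String) (P : List Int) (m : Nat) (g : String) :
    pvGrp G P (m + 1) g =
      pvGrp G P m g ++ (if pvG G m = g then [((m : Int), pvP P m)] else []) := by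
  by_cases h : pvG G m = g <;>
    simp [pvGrp, List.range_succ, List.filter_append, h]

lemma pvTot_succ (G : List String) (P : List Int) (m : Nat) (g : String) :
    pvTot G P (m + 1) g = pvTot G P m g + (if pvG G m = g then pvP P m else 0) := by
  by_cases h : pvG G m = g <;> simp [pvTot, pvGrp_succ, h]

lemma pvGrp_eq_nil_of_not_mem (G : List String) (P : List Int) (m : Nat) (g : String)
    (h : g ∉ pvGenres G m) : pvGrp G P m g = [] := by
  rw [pvGrp, List.map_eq_nil_iff, List.filter_eq_nil_iff]
  intro j hj
  simp only [beq_iff_eq]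
  intro hg
  exact h ((mem_pvGenres G m g).2 ⟨j, List.mem_range.1 hj, hg⟩)

lemma pvTot_of_not_mem (G : List String) (P : List Int) (m : Nat) (g : String)
    (h : g ∉ pvGenres G m) : pvTot G P m g = 0 := by
  simp [pvTot, pvGrp_eq_nil_of_not_mem G P m g h]

lemma pvAfold_char (G : List String) (P : List Int) (m : Nat) :
    (pvAfold G P m).1.keys = pvGenres G m ∧
    (∀ g, (pvAfold G P m).1.getD g 0 = pvTot G P m g) ∧
    (pvAfold G P m).2.keys = pvGenres G m ∧
    (∀ g, (pvAfold G P m).2.getD g [] = pvGrp G P m g) := by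
  induction m with
  | zero =>
      refine ⟨rfl, fun g => ?_, rfl, fun g => ?_⟩ <;>
        simp [pvAfold, pvTot, pvGrp]
  | succ m ih =>
      obtain ⟨hk1, hg1, hk2, hg2⟩ := ih
      have hstep : pvAfold G P (m + 1) =
          (fun st (j : Nat) =>
            if st.1.contains (pvG G j) then
              (st.1.modify (pvG G j) 0 (· + pvP P j),
               st.2.modify (pvG G j) [] (· ++ [((j : Int), pvP P j)]))
            else
              (st.1.insert (pvG G j) (pvP P j),
               st.2.insert (pvG G j) [((j : Int), pvP P j)])) (pvAfold G P m) m := by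
        simp [pvAfold, List.range_succ]
      have hcont1 : (pvAfold G P m).1.contains (pvG G m) = decide (pvG G m ∈ pvGenres G m) := by
        rw [PySem.Dict.contains_eq_decide_mem_keys, hk1]
      by_cases hmem : pvG G m ∈ pvGenres G m
      · rw [hstep]
        simp only [hcont1, hmem, decide_true, if_true]
        refine ⟨?_, fun g => ?_, ?_, fun g => ?_⟩
        · rw [PySem.Dict.keys_modify, PySem.Dict.keys_insert_of_contains _ _ (by rw [hcont1]; simpa),
            hk1, pvGenres_succ, if_pos hmem]
        · rw [PySem.Dict.getD_modify, pvTot_succ, hg1]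
          by_cases hg : g = pvG G m
          · simp [hg]
          · simp [hg, Ne.symm hg, hg1]
        · rw [PySem.Dict.keys_modify, PySem.Dict.keys_insert_of_contains _ _ (by
            rw [PySem.Dict.contains_eq_decide_mem_keys, hk2]; simpa), hk2, pvGenres_succ, if_pos hmem]
        · rw [PySem.Dict.getD_modify, pvGrp_succ, hg2]
          by_cases hg : g = pvG G m
          · simp [hg]
          · simp [hg, Ne.symm hg, hg2]
      · rw [hstep]
        simp only [hcont1, hmem, decide_false, if_false, Bool.false_eq_true]
        have hcont2 : (pvAfold G P m).2.contains (pvG G m) = false := by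
          rw [PySem.Dict.contains_eq_decide_mem_keys, hk2]; simpa
        refine ⟨?_, fun g => ?_, ?_, fun g => ?_⟩
        · rw [PySem.Dict.keys_insert_of_not_contains _ _ (by rw [hcont1]; simpa),
            hk1, pvGenres_succ, if_neg hmem]
        · rw [PySem.Dict.getD_insert, pvTot_succ, hg1]
          by_cases hg : g = pvG G m
          · simp [hg, pvTot_of_not_mem G P m _ hmem]
          · simp [hg, Ne.symm hg]
        · rw [PySem.Dict.keys_insert_of_not_contains _ _ hcont2, hk2, pvGenres_succ, if_neg hmem]
        · rw [PySem.Dict.getD_insert, pvGrp_succ, hg2]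
          by_cases hg : g = pvG G m
          · simp [hg, pvGrp_eq_nil_of_not_mem G P m _ hmem]
          · simp [hg, Ne.symm hg]

lemma pvBfold_char (G : List String) (P : List Int) (m : Nat) :
    (pvBfold G P m).1.keys = pvGenres G m ∧
    (∀ g, (pvBfold G P m).1.getD g 0 = pvTot G P m g) ∧
    (pvBfold G P m).2.keys = pvGenres G m ∧
    (∀ g ∈ pvGenres G m, (pvBfold G P m).2.getD g 0 = ((pvGenres G m).idxOf g : Int)) := by
  induction m with
  | zero =>
      refine ⟨rfl, fun g => ?_, rfl, fun g hg => ?_⟩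
      · simp [pvBfold, pvTot, pvGrp]
      · simp [pvGenres, PySem.Set.ofList_nil] at hg
  | succ m ih =>
      obtain ⟨hk1, hg1, hk2, hg2⟩ := ih
      have hstep : pvBfold G P (m + 1) =
          (fun tf (j : Nat) =>
            if tf.1.contains (pvG G j) then (tf.1.modify (pvG G j) 0 (· + pvP P j), tf.2)
            else (tf.1.insert (pvG G j) (pvP P j),
              tf.2.insert (pvG G j) (tf.2.items.length : Int))) (pvBfold G P m) m := by
        simp [pvBfold, List.range_succ]
      have hcont1 : (pvBfold G P m).1.contains (pvG G m) = decide (pvG G m ∈ pvGenres G m) := by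
        rw [PySem.Dict.contains_eq_decide_mem_keys, hk1]
      have hlen2 : (pvBfold G P m).2.items.length = (pvGenres G m).length := by
        have : (pvBfold G P m).2.items.map (·.1) = pvGenres G m := hk2
        calc (pvBfold G P m).2.items.length
            = ((pvBfold G P m).2.items.map (·.1)).length := by rw [List.length_map]
          _ = (pvGenres G m).length := by rw [this]
      by_cases hmem : pvG G m ∈ pvGenres G m
      · rw [hstep]
        simp only [hcont1, hmem, decide_true, if_true]
        refine ⟨?_, fun g => ?_, ?_, fun g hg => ?_⟩
        · rw [PySem.Dict.keys_modify, PySem.Dict.keys_insert_of_contains _ _ (by rw [hcont1]; simpa),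
            hk1, pvGenres_succ, if_pos hmem]
        · rw [PySem.Dict.getD_modify, pvTot_succ, hg1]
          by_cases hg : g = pvG G m
          · simp [hg]
          · simp [hg, Ne.symm hg, hg1]
        · rw [hk2, pvGenres_succ, if_pos hmem]
        · rw [pvGenres_succ, if_pos hmem] at hg ⊢
          exact hg2 g hg
      · rw [hstep]
        simp only [hcont1, hmem, decide_false, if_false, Bool.false_eq_true]
        have hcont2 : (pvBfold G P m).2.contains (pvG G m) = false := by
          rw [PySem.Dict.contains_eq_decide_mem_keys, hk2]; simpa
        refine ⟨?_, fun g => ?_, ?_, fun g hg => ?_⟩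
        · rw [PySem.Dict.keys_insert_of_not_contains _ _ (by rw [hcont1]; simpa),
            hk1, pvGenres_succ, if_neg hmem]
        · rw [PySem.Dict.getD_insert, pvTot_succ, hg1]
          by_cases hg : g = pvG G m
          · simp [hg, pvTot_of_not_mem G P m _ hmem]
          · simp [hg, Ne.symm hg]
        · rw [PySem.Dict.keys_insert_of_not_contains _ _ hcont2, hk2, pvGenres_succ, if_neg hmem]
        · rw [pvGenres_succ, if_neg hmem] at hg ⊢
          rw [PySem.Dict.getD_insert, hlen2]
          by_cases hgm : g = pvG G m
          · rw [if_pos hgm, hgm, List.idxOf_append_of_notMem hmem]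
            simp
          · rw [if_neg hgm]
            have hgmem : g ∈ pvGenres G m := by
              rcases List.mem_append.1 hg with h | h
              · exact h
              · simp at h; exact absurd h hgm
            rw [hg2 g hgmem, List.idxOf_append_of_mem hgmem]


-- STABILITY of Python's reverse sort (general lemmas)
lemma pv_insertBy_pairwise {α κ : Type} [LinearOrder κ] (key : α → κ) (rank : α → Nat)
    (x : α) (ys : List α)
    (hys : ys.Pairwise (fun a b => key b < key a ∨ (key a = key b ∧ rank a < rank b)))
    (hrank : ∀ y ∈ ys, rank y < rank x) :
    (PySem.List.insertBy (fun a b => decide (key b < key a)) x ys).Pairwise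
      (fun a b => key b < key a ∨ (key a = key b ∧ rank a < rank b)) := by
  induction ys with
  | nil => simp [PySem.List.insertBy]
  | cons y ys ih =>
      rw [List.pairwise_cons] at hys
      obtain ⟨hy, hys'⟩ := hys
      by_cases hlt : key y < key x
      · rw [show PySem.List.insertBy (fun a b => decide (key b < key a)) x (y :: ys) =
            x :: y :: ys by simp [PySem.List.insertBy, hlt]]
        refine List.Pairwise.cons (fun z hz => ?_) (List.pairwise_cons.2 ⟨hy, hys'⟩)
        rcases List.mem_cons.1 hz with rfl | hz'
        · exact Or.inl hlt
        · rcases hy z hz' with h | h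
          · exact Or.inl (h.trans hlt)
          · exact Or.inl (h.1 ▸ hlt)
      · rw [show PySem.List.insertBy (fun a b => decide (key b < key a)) x (y :: ys) =
            y :: PySem.List.insertBy (fun a b => decide (key b < key a)) x ys by
              simp [PySem.List.insertBy, hlt]]
        refine List.Pairwise.cons (fun z hz => ?_)
          (ih hys' (fun z hz => hrank z (List.mem_cons_of_mem _ hz)))
        rcases (PySem.List.mem_insertBy _ _ _ _).1 hz with rfl | hz'
        · rcases lt_or_eq_of_le (le_of_not_gt hlt) with h | h
          · exact Or.inl h
          · exact Or.inr ⟨h.symm, hrank y (List.mem_cons_self)⟩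
        · exact hy z hz'

lemma pv_sorted_rev_stable {α κ : Type} [LinearOrder κ] (key : α → κ) (rank : α → Nat) :
    ∀ (xs acc : List α), xs.Pairwise (fun a b => rank a < rank b) →
    acc.Pairwise (fun a b => key b < key a ∨ (key a = key b ∧ rank a < rank b)) →
    (∀ a ∈ acc, ∀ b ∈ xs, rank a < rank b) →
    (List.foldl (fun acc x => PySem.List.insertBy (fun a b => decide (key b < key a)) x acc)
      acc xs).Pairwise (fun a b => key b < key a ∨ (key a = key b ∧ rank a < rank b)) := by
  intro xs
  induction xs with
  | nil => intro acc _ hacc _; simpa using hacc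
  | cons x xs ih =>
      intro acc hxs hacc hcross
      rw [List.pairwise_cons] at hxs
      rw [List.foldl_cons]
      apply ih _ hxs.2
      · exact pv_insertBy_pairwise key rank x acc hacc
          (fun y hy => hcross y hy x (List.mem_cons_self))
      · intro a ha b hb
        rcases (PySem.List.mem_insertBy _ _ _ _).1 ha with rfl | ha'
        · exact hxs.1 b hb
        · exact hcross a ha' b (List.mem_cons_of_mem _ hb)

lemma pv_sorted_rev_pairwise {α κ : Type} [LinearOrder κ] (key : α → κ) (rank : α → Nat)
    (xs : List α) (hxs : xs.Pairwise (fun a b => rank a < rank b)) :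
    (PySem.List.sorted xs key true).Pairwise
      (fun a b => key b < key a ∨ (key a = key b ∧ rank a < rank b)) := by
  rw [PySem.List.sorted_rev_eq_foldl_insertBy]
  exact pv_sorted_rev_stable key rank xs [] hxs (by simp) (by simp)

lemma pv_partition_perm {ι : Type} (keyf : ι → String) :
    ∀ (S : List String) (l : List ι), S.Nodup → (∀ x ∈ l, keyf x ∈ S) →
    (S.flatMap (fun g => l.filter (fun x => keyf x == g))).Perm l := by
  intro S
  induction S with
  | nil =>
      intro l _ hcov
      cases l with
      | nil => simp
      | cons x t => exact absurd (hcov x (List.mem_cons_self)) (by simp)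
  | cons g S ih =>
      intro l hnd hcov
      have hgS : g ∉ S := (List.nodup_cons.1 hnd).1
      have hndS : S.Nodup := (List.nodup_cons.1 hnd).2
      have hfilters : ∀ g' ∈ S, l.filter (fun x => keyf x == g') =
          (l.filter (fun x => !(keyf x == g))).filter (fun x => keyf x == g') := by
        intro g' hg'
        rw [List.filter_filter]
        apply List.filter_congr
        intro x _
        by_cases h : keyf x = g'
        · rw [h]
          have hne : (g' == g) = false := by
            simp only [beq_eq_false_iff_ne]
            exact fun hc => hgS (hc ▸ hg')
          simp [hne]
        · have : (keyf x == g') = false := by simpa using h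
          simp [this]
      have hcov' : ∀ x ∈ l.filter (fun x => !(keyf x == g)), keyf x ∈ S := by
        intro x hx
        rw [List.mem_filter] at hx
        rcases List.mem_cons.1 (hcov x hx.1) with h | h
        · exact absurd h (by simpa using hx.2)
        · exact h
      have e1 : ((g :: S).flatMap (fun g' => l.filter (fun x => keyf x == g'))) =
          l.filter (fun x => keyf x == g) ++
            S.flatMap (fun g' => (l.filter (fun x => !(keyf x == g))).filter
              (fun x => keyf x == g')) := by
        rw [List.flatMap_cons]
        congr 1
        exact List.flatMap_congr (fun g' hg' => hfilters g' hg')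
      rw [e1]
      exact ((List.Perm.append_left _ (ih _ hndS hcov')).trans (List.filter_append_perm _ l))

lemma pv_take2_fold {β : Type} (l : List (Int × β)) (acc : List Int) :
    (l.foldl (fun rc ip => if rc.2 ≥ 2 then rc else (rc.1 ++ [ip.1], rc.2 + 1))
      (acc, (0 : Int))).1 = acc ++ (l.take 2).map (·.1) := by
  match l with
  | [] => simp
  | [a] => simp
  | a :: b :: t =>
      have h2 : ∀ (t' : List (Int × β)) (st : List Int × Int), st.2 ≥ 2 →
          t'.foldl (fun rc ip => if rc.2 ≥ 2 then rc else (rc.1 ++ [ip.1], rc.2 + 1)) st = st := by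
        intro t'
        induction t' with
        | nil => intro st _; rfl
        | cons c t' ih =>
            intro st hst
            simp only [List.foldl_cons, if_pos hst]
            exact ih st hst
      simp only [List.foldl_cons]
      norm_num
      rw [h2 t (acc ++ [a.1, b.1], 2) (by norm_num)]


lemma pv_emit_block (gfun : Int → String) (g : String) :
    ∀ (blk : List Int) (acc : List Int) (d : PySem.Dict String Int),
    (∀ i ∈ blk, gfun i = g) →
    ∃ d₂ : PySem.Dict String Int,
      blk.foldl (fun st i =>
        if st.2.getD (gfun i) 0 < 2 then (st.1 ++ [i], st.2.insert (gfun i) (st.2.getD (gfun i) 0 + 1)) else st)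
        (acc, d) =
      (acc ++ blk.take (2 - d.getD g 0).toNat, d₂) ∧
      ∀ g', g' ≠ g → d₂.getD g' 0 = d.getD g' 0 := by
  intro blk
  induction blk with
  | nil => intro acc d _; exact ⟨d, by simp, fun _ _ => rfl⟩
  | cons i blk ih =>
      intro acc d hblk
      have hig : gfun i = g := hblk i (List.mem_cons_self)
      by_cases hc : d.getD g 0 < 2
      · obtain ⟨d₂, h1, h2⟩ := ih (acc ++ [i]) (d.insert g (d.getD g 0 + 1))
          (fun j hj => hblk j (List.mem_cons_of_mem _ hj))
        refine ⟨d₂, ?_, fun g' hg' => ?_⟩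
        · simp only [List.foldl_cons, hig, if_pos hc]
          rw [h1]
          have hD : (d.insert g (d.getD g 0 + 1)).getD g 0 = d.getD g 0 + 1 := by
            simp [PySem.Dict.getD_insert_self]
          rw [hD]
          have harith : (2 - d.getD g 0).toNat = (2 - (d.getD g 0 + 1)).toNat + 1 := by omega
          rw [harith]
          simp
        · rw [h2 g' hg', PySem.Dict.getD_insert_of_ne _ _ _ hg']
      · obtain ⟨d₂, h1, h2⟩ := ih acc d (fun j hj => hblk j (List.mem_cons_of_mem _ hj))
        refine ⟨d₂, ?_, h2⟩
        simp only [List.foldl_cons, hig, if_neg hc]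
        rw [h1]
        have h0 : (2 - d.getD g 0).toNat = 0 := by omega
        simp [h0]

lemma pv_emit_blocks (gfun : Int → String) :
    ∀ (bs : List (String × List Int)) (acc : List Int) (d : PySem.Dict String Int),
    (∀ b ∈ bs, ∀ i ∈ b.2, gfun i = b.1) →
    (∀ b ∈ bs, d.getD b.1 0 = 0) →
    bs.Pairwise (fun b c => b.1 ≠ c.1) →
    ((bs.flatMap (·.2)).foldl (fun st i =>
        if st.2.getD (gfun i) 0 < 2 then (st.1 ++ [i], st.2.insert (gfun i) (st.2.getD (gfun i) 0 + 1)) else st)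
      (acc, d)).1 = acc ++ bs.flatMap (fun b => b.2.take 2) := by
  intro bs
  induction bs with
  | nil => intro acc d _ _ _; simp
  | cons b bs ih =>
      intro acc d hg hd hnd
      rw [List.flatMap_cons, List.foldl_append]
      obtain ⟨d₂, h1, h2⟩ := pv_emit_block gfun b.1 b.2 acc d (hg b (List.mem_cons_self))
      have hd0 : d.getD b.1 0 = 0 := hd b (List.mem_cons_self)
      rw [hd0, show ((2:Int) - 0).toNat = 2 by decide] at h1
      rw [h1]
      rw [List.pairwise_cons] at hnd
      rw [ih (acc ++ b.2.take 2) d₂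
        (fun c hc => hg c (List.mem_cons_of_mem _ hc))
        (fun c hc => by rw [h2 c.1 (Ne.symm (hnd.1 c hc)), hd c (List.mem_cons_of_mem _ hc)])
        hnd.2]
      simp [List.flatMap_cons]


-- a Nodup list is pairwise strictly increasing in idxOf
lemma pv_nodup_pairwise_idxOf (l : List String) (h : l.Nodup) :
    l.Pairwise (fun a b => l.idxOf a < l.idxOf b) := by
  rw [List.pairwise_iff_getElem]
  intro i j hi hj hij
  rw [List.Nodup.idxOf_getElem h i hi, List.Nodup.idxOf_getElem h j hj]
  exact hij


lemma mem_pvGrp (G : List String) (P : List Int) (m : Nat) (g : String) (ip : Int × Int) :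
    ip ∈ pvGrp G P m g ↔ ∃ j < m, pvG G j = g ∧ ip = ((j : Int), pvP P j) := by
  simp only [pvGrp, List.mem_map, List.mem_filter, List.mem_range, beq_iff_eq]
  constructor
  · rintro ⟨j, ⟨hj, hg⟩, rfl⟩; exact ⟨j, hj, hg, rfl⟩
  · rintro ⟨j, hj, hg, rfl⟩; exact ⟨j, ⟨hj, hg⟩, rfl⟩

lemma pvA_unfold (G : List String) (P : List Int) :
    get_melon_best_album_v2 G P =
      (PySem.List.sorted (pvAfold G P G.length).1.items (fun it => it.2) true).foldl
        (fun result gp =>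
          ((PySem.List.sorted ((pvAfold G P G.length).2.getD gp.1 []) (fun it => it.2) true).foldl
            (fun rc ip => if rc.2 ≥ 2 then rc else (rc.1 ++ [ip.1], rc.2 + 1)) (result, (0 : Int))).1)
        [] := by
  unfold get_melon_best_album_v2 pvAfold
  simp only [PySem.List.pyRange_zero_natCast, List.foldl_map, PySem.List.pyGetD_natCast, pvG, pvP]

lemma pvB_unfold (G : List String) (P : List Int) :
    get_melon_best_album_v2_alt G P =
      ((PySem.List.sorted (PySem.List.pyRange 0 (G.length : Int) 1)
          (fun i => toLex (-((pvBfold G P G.length).1.getD (PySem.List.pyGetD G i "") 0),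
            toLex ((pvBfold G P G.length).2.getD (PySem.List.pyGetD G i "") 0,
              toLex (-(PySem.List.pyGetD P i 0), i)))) false).foldl
        (fun st i =>
          if st.2.getD (PySem.List.pyGetD G i "") 0 < 2 then
            (st.1 ++ [i], st.2.insert (PySem.List.pyGetD G i "") (st.2.getD (PySem.List.pyGetD G i "") 0 + 1))
          else st)
        (([] : List Int), (PySem.Dict.empty : PySem.Dict String Int))).1 := by
  unfold get_melon_best_album_v2_alt pvBfold
  simp only [PySem.List.pyRange_zero_natCast, List.foldl_map, PySem.List.pyGetD_natCast, pvG, pvP]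


lemma pv_main (G : List String) (P : List Int) :
    get_melon_best_album_v2 G P = get_melon_best_album_v2_alt G P := by
  obtain ⟨hk1, hg1, hk2, hg2⟩ := pvAfold_char G P G.length
  obtain ⟨bk1, bg1, bk2, bg2⟩ := pvBfold_char G P G.length
  rw [pvA_unfold, pvB_unfold]
  have hnodupkeys : (pvAfold G P G.length).1.keys.Nodup := by
    rw [hk1]; exact pvGenres_nodup G G.length
  have hitems : (pvAfold G P G.length).1.items =
      (pvGenres G G.length).map (fun g => (g, pvTot G P G.length g)) := by
    rw [PySem.Dict.items_eq_map_keys _ hnodupkeys 0, hk1]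
    exact List.map_congr_left (fun g _ => by rw [hg1])
  rw [hitems]
  simp only [hg2, pv_take2_fold]
  rw [PySem.List.foldl_append_eq_flatMap, List.nil_append]
  -- names for the two sorted stages and B's key
  set SAg := PySem.List.sorted ((pvGenres G G.length).map (fun g => (g, pvTot G P G.length g)))
      (fun it => it.2) true with hSAg
  set SL := fun g => PySem.List.sorted (pvGrp G P G.length g) (fun it => it.2) true with hSL
  set keyB := fun (i : Int) => toLex (-((pvBfold G P G.length).1.getD (PySem.List.pyGetD G i "") 0),
      toLex ((pvBfold G P G.length).2.getD (PySem.List.pyGetD G i "") 0,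
        toLex (-(PySem.List.pyGetD P i 0), i))) with hkeyB
  set AF := SAg.flatMap (fun gp => (SL gp.1).map (·.1)) with hAF
  -- evaluation of B's key on an in-range index
  have hkey : ∀ j < G.length, keyB (j : Int) =
      toLex (-(pvTot G P G.length (pvG G j)),
        toLex ((((pvGenres G G.length).idxOf (pvG G j) : Nat) : Int),
          toLex (-(pvP P j), (j : Int)))) := by
    intro j hj
    have hmem : pvG G j ∈ pvGenres G G.length := (mem_pvGenres G _ _).2 ⟨j, hj, rfl⟩
    rw [hkeyB]
    simp only [PySem.List.pyGetD_natCast]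
    rw [show G.getD j "" = pvG G j from rfl, show P.getD j 0 = pvP P j from rfl, bg1, bg2 _ hmem]
  -- membership shapes
  have hmemSAg : ∀ gp ∈ SAg, gp.1 ∈ pvGenres G G.length ∧ gp.2 = pvTot G P G.length gp.1 := by
    intro gp hgp
    rw [hSAg, PySem.List.mem_sorted] at hgp
    obtain ⟨g, hg, rfl⟩ := List.mem_map.1 hgp
    exact ⟨hg, rfl⟩
  have hmemSL : ∀ g, ∀ ip ∈ SL g, ∃ j < G.length, pvG G j = g ∧ ip = ((j : Int), pvP P j) := by
    intro g ip hip
    rw [hSL, PySem.List.mem_sorted] at hip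
    exact (mem_pvGrp G P _ g ip).1 hip
  -- stability facts
  have hstabO : SAg.Pairwise (fun a b => b.2 < a.2 ∨
      (a.2 = b.2 ∧ (pvGenres G G.length).idxOf a.1 < (pvGenres G G.length).idxOf b.1)) := by
    rw [hSAg]
    refine pv_sorted_rev_pairwise (fun it : String × Int => it.2)
      (fun gp : String × Int => (pvGenres G G.length).idxOf gp.1) _ ?_
    rw [List.pairwise_map]
    exact pv_nodup_pairwise_idxOf _ (pvGenres_nodup G G.length)
  have hstabI : ∀ g, (SL g).Pairwise (fun a b => b.2 < a.2 ∨
      (a.2 = b.2 ∧ a.1.toNat < b.1.toNat)) := by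
    intro g
    rw [hSL]
    refine pv_sorted_rev_pairwise (fun it : Int × Int => it.2)
      (fun ip : Int × Int => ip.1.toNat) _ ?_
    rw [pvGrp, List.pairwise_map]
    refine (List.Pairwise.filter _ List.pairwise_lt_range).imp ?_
    intro a b h
    simpa using h
  -- the global sort equals the concatenation of A's blocks
  have hperm : AF.Perm (PySem.List.pyRange 0 (G.length : Int) 1) := by
    have s1 : AF.Perm (((pvGenres G G.length).map (fun g => (g, pvTot G P G.length g))).flatMap
        (fun gp => (SL gp.1).map (·.1))) :=
      List.Perm.flatMap_right _ (PySem.List.sorted_perm _ _ _)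
    have s2 : (((pvGenres G G.length).map (fun g => (g, pvTot G P G.length g))).flatMap
        (fun gp => (SL gp.1).map (·.1))) = (pvGenres G G.length).flatMap
        (fun g => (SL g).map (·.1)) := List.flatMap_map _ _ _
    have s3 : ((pvGenres G G.length).flatMap (fun g => (SL g).map (·.1))).Perm
        ((pvGenres G G.length).flatMap (fun g => (pvGrp G P G.length g).map (·.1))) := by
      refine List.Perm.flatMap_left _ (fun g _ => ?_)
      exact List.Perm.map _ (PySem.List.sorted_perm _ _ _)
    have s4 : (pvGenres G G.length).flatMap (fun g => (pvGrp G P G.length g).map (·.1)) =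
        ((pvGenres G G.length).flatMap
          (fun g => (List.range G.length).filter (fun j => pvG G j == g))).map
          (fun j : Nat => (j : Int)) := by
      rw [List.map_flatMap]
      refine List.flatMap_congr (fun g _ => ?_)
      simp [pvGrp, List.map_map, Function.comp]
    have s5 : (((pvGenres G G.length).flatMap
        (fun g => (List.range G.length).filter (fun j => pvG G j == g))).map
          (fun j : Nat => (j : Int))).Perm ((List.range G.length).map (fun j : Nat => (j : Int))) := by
      refine List.Perm.map _ ?_
      refine pv_partition_perm (pvG G) _ _ (pvGenres_nodup G G.length) ?_
      intro j hj
      exact (mem_pvGenres G _ _).2 ⟨j, List.mem_range.1 hj, rfl⟩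
    rw [PySem.List.pyRange_zero_natCast]
    exact ((s1.trans (s2 ▸ s3)).trans (by rw [s4])).trans s5
  have hpair : AF.Pairwise (fun a b => keyB a < keyB b) := by
    rw [hAF, List.flatMap_def]
    rw [List.pairwise_flatten]
    constructor
    · intro l' hl'
      obtain ⟨gp, hgp, rfl⟩ := List.mem_map.1 hl'
      rw [List.pairwise_map]
      refine ((hstabI gp.1).imp_of_mem ?_)
      intro a b ha hb hR
      obtain ⟨j, hj, hgj, rfl⟩ := hmemSL gp.1 a ha
      obtain ⟨j', hj', hgj', rfl⟩ := hmemSL gp.1 b hb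
      rw [hkey j hj, hkey j' hj', hgj, hgj']
      rw [Prod.Lex.toLex_lt_toLex]
      refine Or.inr ⟨rfl, ?_⟩
      rw [Prod.Lex.toLex_lt_toLex]
      refine Or.inr ⟨rfl, ?_⟩
      rw [Prod.Lex.toLex_lt_toLex]
      simp only [Int.toNat_natCast] at hR
      rcases hR with h | ⟨h1, h2⟩
      · exact Or.inl (by omega)
      · exact Or.inr ⟨by omega, show ((j:Int) : Int) < ((j':Nat) : Int) by exact_mod_cast h2⟩
    · rw [List.pairwise_map]
      refine hstabO.imp_of_mem ?_
      intro gp gq hgp hgq hR x hx y hy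
      obtain ⟨hgpm, hgpt⟩ := hmemSAg gp hgp
      obtain ⟨hgqm, hgqt⟩ := hmemSAg gq hgq
      obtain ⟨a, ha, rfl⟩ := List.mem_map.1 hx
      obtain ⟨b, hb, rfl⟩ := List.mem_map.1 hy
      obtain ⟨j, hj, hgj, rfl⟩ := hmemSL gp.1 a ha
      obtain ⟨j', hj', hgj', rfl⟩ := hmemSL gq.1 b hb
      rw [hkey j hj, hkey j' hj', hgj, hgj']
      rw [Prod.Lex.toLex_lt_toLex]
      rcases hR with h | ⟨h1, h2⟩
      · exact Or.inl (by rw [hgpt, hgqt] at h; omega)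
      · refine Or.inr ⟨by rw [hgpt, hgqt] at h1; omega, ?_⟩
        rw [Prod.Lex.toLex_lt_toLex]
        exact Or.inl (show ((List.idxOf gp.1 (pvGenres G G.length) : Nat) : Int) <
          ((List.idxOf gq.1 (pvGenres G G.length) : Nat) : Int) by exact_mod_cast h2)
  have horder : PySem.List.sorted (PySem.List.pyRange 0 (G.length : Int) 1) keyB false = AF :=
    PySem.List.sorted_eq_of_perm_of_pairwise_lt _ _ _ hperm hpair
  rw [horder]
  -- B's emit pass over the concatenated blocks
  have hflat : AF = (SAg.map (fun gp => (gp.1, (SL gp.1).map (·.1)))).flatMap (·.2) := by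
    rw [hAF, List.flatMap_map]
  have hndfst : (SAg.map (fun gp => (gp.1, (SL gp.1).map (·.1)))).Pairwise
      (fun b c => b.1 ≠ c.1) := by
    have hnodup : (SAg.map (·.1)).Nodup := by
      have hperm2 : (SAg.map (·.1)).Perm
          ((((pvGenres G G.length).map (fun g => (g, pvTot G P G.length g))).map (·.1))) :=
        List.Perm.map _ (PySem.List.sorted_perm _ _ _)
      rw [List.map_map] at hperm2
      have : (((pvGenres G G.length)).map ((·.1) ∘ (fun g => (g, pvTot G P G.length g)))) =
          pvGenres G G.length := by
        simp [Function.comp_def]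
      rw [this] at hperm2
      exact hperm2.nodup_iff.2 (pvGenres_nodup G G.length)
    exact List.pairwise_map.2 (List.pairwise_map.1 hnodup)
  have hemit := pv_emit_blocks (fun i => PySem.List.pyGetD G i "")
    (SAg.map (fun gp => (gp.1, (SL gp.1).map (·.1)))) [] PySem.Dict.empty
    (by
      intro b hb i hi
      obtain ⟨gp, hgp, rfl⟩ := List.mem_map.1 hb
      obtain ⟨a, ha, rfl⟩ := List.mem_map.1 hi
      obtain ⟨j, hj, hgj, rfl⟩ := hmemSL gp.1 a ha
      simpa [PySem.List.pyGetD_natCast, pvG] using hgj)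
    (by intro b _; simp [PySem.Dict.getD_empty])
    hndfst
  rw [← hflat] at hemit
  rw [hemit, List.nil_append, List.flatMap_map]
  refine List.flatMap_congr (fun gp _ => ?_)
  rw [List.map_take]

-- ===== VERDICT (by name: the statement is the Claim_ definition above) =====
theorem get_melon_best_album_v2_spec : Claim_equal_get_melon_best_album_v2 := by
  intro G P _ _
  unfold Spec_get_melon_best_album_v2
  exact pv_main G P
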